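/- GENERATED by farm/worked/mk_tree_copies.py from farm/worked/vorbis_deinit.4/Proof.lean (a worked proof of the farm's unit `vorbis_deinit.4`,
   accepted by the verdict) — do not edit. -/
import Asan.CheckWalk
import Vorbis.Spec.Units.vorbis_deinit_4

open X86 X86.User Asan Vorbis Vorbis.Spec

set_option maxRecDepth 4000
set_option maxHeartbeats 4000000

/-- Segment 4 of `vorbis_deinit` (`cut33` … `ret`: `pop rbx ; pop rbp ; pop r12 ; pop r13 ; pop r14 ; ret`): from the assertion
`vorbis_deinit.At` at the cut point to the function's `Returned`. A SEGMENT proof: the walk starts at a state `v` in the middle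
of the function; `e` is the state at the function's entry, which the assertion carries. -/
theorem Vorbis.Spec.Worked.vorbis_deinit_4_ok : Vorbis.Spec.vorbis_deinit_4.Statement := by
  intro Lay hLay μ hμ u₀ hcode others frames Blk e ret v hat
  -- 1. the ENTRY state's facts, from the `AtEntry` the assertion carries (he_room, he_top, he_stack, he_retAddr … are about `e`)
  have he := hat.entry
  v_entry he
  -- 2. the PRESENT state's facts under the names the walker reads: rip, the registers, the code span, DF / MXCSR / SseOK
  have w_rip := hat.rip
  have w_rsp := hat.rsp
  have w_rbx := hat.rbx
  have w_r15 := hat.r15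
  have w_eq := Vorbis.conv_code_eqOn hat.code
  have hdf : v.flags .df = false := (show abiInv _ from hat.inv).1
  have hmx : v.mxcsr &&& 0x1F80 = 0x1F80 := (show abiInv _ from hat.inv).2
  have hsse := Vorbis.sseOK_of_abiInv hat.inv
  -- 3. the stack slots the segment will pop (the walker finds a load's value among the hypotheses `v.mem.readLE a n = x`)
  have s1 := hat.slot_rbx
  have s2 := hat.slot_rbp
  have s3 := hat.slot_r12
  have s4 := hat.slot_r13
  have s5 := hat.slot_r14
  -- … and the return address: a slot of the ENTRY memory (`he_retAddr`), read through the footprint so far (`hat.same`)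
  have s0 : UInt64.ofNat (v.mem.readLE (e.reg .rsp) 8) = ret := by
    rw [hat.same.readLE (e.reg .rsp) 8 (by omega) ?_]
    · exact he_retAddr
    · intro w hw
      have e1 : w = ⟨(e.reg .rsp).toNat - 96, (e.reg .rsp).toNat⟩ := List.mem_singleton.mp hw
      subst e1
      simp only
      omega
  -- 4. the walk, as in a whole function
  u_walk hcode [hμ.vendor] span [Vorbis.L.textLo, Vorbis.L.textHi] side (v_side)
  -- 5. the exit: `Returned … e ret` is about the ENTRY state `e`, the walker's `w_kept` / `w_mem` are relative to `v`: `v_returned`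
  -- closes rip, rsp, code, inv and leaves the post, `saved` and `same`, which come from the assertion's fields
  refine ReachVia.done ?_
  v_returned
  · -- the post: no shadow byte was written since the entry (H6)
    show ShadowUntouched e.mem s_107a5c.mem
    rw [w_mem]
    exact hat.untouched
  · -- the callee-saved registers: five popped back, r15 never touched
    intro r hr
    cases r <;> first
      | (exact absurd hr (by decide))
      | (with_reducible assumption)
      | (rw [w_kept .r15 rfl]; exact hat.r15)
  · -- the footprint: nothing was stored but below the entry rsp
    simp only [X86.User.Spec.footprint, vspec]
    rw [w_mem]
    exact hat.same
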